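-- pv_equiv track=rewrite | github.com/vaheed/HER-Ai | her-core/her_mcp/manager.py | _normalize_legacy_stdio_args
-- ===== SOURCE A (Python) =====
-- def _normalize_legacy_stdio_args(command: str, args: list[str]) -> list[str]:
--     """Remove legacy transport flags that break modern MCP server CLIs."""
--     if command != "npx":
--         return list(args)
--
--     normalized: list[str] = []
--     idx = 0
--     while idx < len(args):
--         token = args[idx]
--         if token == "--transport":
--             # Legacy config used "--transport stdio" for Node servers.
--             # Many current MCP npm packages do not support this flag and
--             # interpret it as positional input (path/URL), causing startup failures.
--             next_token = args[idx + 1] if idx + 1 < len(args) else None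
--             if next_token == "stdio":
--                 idx += 2
--                 continue
--             idx += 1
--             continue
--         normalized.append(token)
--         idx += 1
--     return normalized
-- ===== SOURCE B (Python) =====
-- def _normalize_legacy_stdio_args(command: str, args: list[str]) -> list[str]:
--     """Remove legacy transport flags that break modern MCP server CLIs."""
--     if command != "npx":
--         return list(args)
--     # Pair each token with its predecessor and keep a token unless it is the
--     # flag itself, or a "stdio" immediately following the flag.
--     prevs = [None] + args
--     return [t for p, t in zip(prevs, args)
--             if t != "--transport" and not (t == "stdio" and p == "--transport")]
-- ===== Notes on version B (the rewrite author's own statement) =====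
-- stated objective: simpler
-- what changed: Replaces the index-advancing while loop with lookahead and skip-by-2 by a stateless single comprehension that zips each token with its predecessor and keeps a token unless it is '--transport' or a 'stdio' immediately following '--transport'.
import Mathlib
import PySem

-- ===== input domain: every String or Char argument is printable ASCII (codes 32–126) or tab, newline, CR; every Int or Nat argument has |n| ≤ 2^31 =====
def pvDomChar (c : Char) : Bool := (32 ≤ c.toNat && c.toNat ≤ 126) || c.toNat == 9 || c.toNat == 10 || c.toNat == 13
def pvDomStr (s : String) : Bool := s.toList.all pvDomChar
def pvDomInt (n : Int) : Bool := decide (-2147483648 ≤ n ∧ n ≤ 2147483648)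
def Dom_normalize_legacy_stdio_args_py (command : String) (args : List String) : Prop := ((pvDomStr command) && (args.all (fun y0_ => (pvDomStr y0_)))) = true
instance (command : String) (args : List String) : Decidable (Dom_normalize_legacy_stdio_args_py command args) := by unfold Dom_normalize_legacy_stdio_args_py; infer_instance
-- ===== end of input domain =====

-- B replaces A's index-advancing while loop by a stateless zip-with-predecessor filter (objective: simpler; same return value everywhere).

-- ===== PORT A =====
-- A's while loop over idx, advancing by 1 or 2, transcribed as recursion on the
-- remaining suffix args[idx:]; `normalized` is the accumulator list.
def pvALoop (rest : List String) (normalized : List String) : List String :=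
  match rest with
  | [] => normalized
  | token :: tail =>
    if token = "--transport" then
      match _htail : tail with
      | next :: tail2 =>
        if next = "stdio" then pvALoop tail2 normalized   -- idx += 2; continue
        else pvALoop tail normalized                       -- idx += 1; continue
      | [] => pvALoop tail normalized                      -- next_token is None
    else pvALoop tail (normalized ++ [token])
termination_by rest.length
decreasing_by all_goals (subst_vars; simp only [List.length_cons]; omega)

def normalize_legacy_stdio_args_py (command : String) (args : List String) : List String :=
  if command ≠ "npx" then args
  else pvALoop args []

-- ===== PORT B =====
def pvBKeep (p : Option String) (t : String) : Bool :=
  decide (t ≠ "--transport" ∧ ¬(t = "stdio" ∧ p = some "--transport"))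

def normalize_legacy_stdio_args_py_alt (command : String) (args : List String) : List String :=
  if command ≠ "npx" then args
  else
    let prevs : List (Option String) := none :: args.map some   -- [None] + args
    ((prevs.zip args).filter (fun pt => pvBKeep pt.1 pt.2)).map (fun pt => pt.2)

-- ===== PRECONDITION & SPEC =====
def Spec_normalize_legacy_stdio_args_py (command : String) (args : List String) (out : List String) : Prop := out = normalize_legacy_stdio_args_py_alt command args
instance (command : String) (args : List String) (out : List String) : Decidable (Spec_normalize_legacy_stdio_args_py command args out) := by unfold Spec_normalize_legacy_stdio_args_py; infer_instance

-- ===== CLAIM (what is proved, stated in full; the proofs are below) =====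
def Claim_equal_normalize_legacy_stdio_args_py : Prop := ∀ (command : String) (args : List String), Dom_normalize_legacy_stdio_args_py command args → Spec_normalize_legacy_stdio_args_py command args (normalize_legacy_stdio_args_py command args)

-- ===== LEMMAS AND PROOFS =====

-- Unfolding equations for A's loop.
theorem pvALoop_nil (acc : List String) : pvALoop [] acc = acc := by
  rw [pvALoop.eq_def]

theorem pvALoop_flag_nil (acc : List String) :
    pvALoop ["--transport"] acc = pvALoop [] acc := by
  rw [pvALoop.eq_def]; simp

theorem pvALoop_flag_stdio (t2 acc : List String) :
    pvALoop ("--transport" :: "stdio" :: t2) acc = pvALoop t2 acc := by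
  rw [pvALoop.eq_def]; simp

theorem pvALoop_flag_other (next : String) (t2 acc : List String) (hn : next ≠ "stdio") :
    pvALoop ("--transport" :: next :: t2) acc = pvALoop (next :: t2) acc := by
  rw [pvALoop.eq_def]; simp [hn]

theorem pvALoop_keep (token : String) (tail acc : List String) (ht : token ≠ "--transport") :
    pvALoop (token :: tail) acc = pvALoop tail (acc ++ [token]) := by
  rw [pvALoop.eq_def]; simp [ht]

-- B's comprehension, parametrised by the predecessor of the head token.
def pvBFilter (prev : Option String) (args : List String) : List String :=
  (((prev :: args.map some).zip args).filter (fun pt => pvBKeep pt.1 pt.2)).map (fun pt => pt.2)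

theorem pvBFilter_cons (prev : Option String) (a : String) (rest : List String) :
    pvBFilter prev (a :: rest) =
      (if pvBKeep prev a then [a] else []) ++ pvBFilter (some a) rest := by
  simp [pvBFilter, List.filter]
  by_cases h : pvBKeep prev a = true <;> simp [h]

theorem pvALoop_acc (n : Nat) :
    ∀ (rest acc : List String), rest.length ≤ n →
      pvALoop rest acc = acc ++ pvALoop rest [] := by
  induction n with
  | zero =>
    intro rest acc h
    have hr : rest = [] := List.eq_nil_of_length_eq_zero (Nat.le_zero.mp h)
    subst hr
    simp [pvALoop_nil]
  | succ n ih =>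
    intro rest acc h
    cases rest with
    | nil => simp [pvALoop_nil]
    | cons token tail =>
      by_cases ht : token = "--transport"
      · subst ht
        cases tail with
        | nil =>
          rw [pvALoop_flag_nil, pvALoop_flag_nil, pvALoop_nil, pvALoop_nil]; simp
        | cons next tail2 =>
          by_cases hn : next = "stdio"
          · subst hn
            rw [pvALoop_flag_stdio, pvALoop_flag_stdio]
            exact ih tail2 acc (by simp only [List.length_cons] at h; omega)
          · rw [pvALoop_flag_other next tail2 acc hn, pvALoop_flag_other next tail2 [] hn]
            exact ih (next :: tail2) acc (by simp only [List.length_cons] at h ⊢; omega)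
      · rw [pvALoop_keep token tail acc ht, pvALoop_keep token tail [] ht]
        have h1 : tail.length ≤ n := by simp only [List.length_cons] at h; omega
        rw [ih tail (acc ++ [token]) h1, ih tail ([] ++ [token]) h1]
        simp

-- A's result equals B's filter, for any predecessor value ≠ "--transport".
theorem pvKey (n : Nat) :
    ∀ (args : List String) (prev : Option String), args.length ≤ n →
      prev ≠ some "--transport" →
      pvALoop args [] = pvBFilter prev args := by
  induction n with
  | zero =>
    intro args prev h _
    have hr : args = [] := List.eq_nil_of_length_eq_zero (Nat.le_zero.mp h)
    subst hr
    simp [pvALoop_nil, pvBFilter]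
  | succ n ih =>
    intro args prev h hprev
    cases args with
    | nil => simp [pvALoop_nil, pvBFilter]
    | cons token tail =>
      rw [pvBFilter_cons]
      by_cases ht : token = "--transport"
      · subst ht
        have hkeep : pvBKeep prev "--transport" = false := by simp [pvBKeep]
        rw [hkeep]
        simp only [Bool.false_eq_true, if_false, List.nil_append]
        cases tail with
        | nil => rw [pvALoop_flag_nil, pvALoop_nil]; simp [pvBFilter]
        | cons next tail2 =>
          rw [pvBFilter_cons]
          by_cases hn : next = "stdio"
          · subst hn
            rw [pvALoop_flag_stdio]
            have hk2 : pvBKeep (some "--transport") "stdio" = false := by decide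
            rw [hk2]
            simp only [Bool.false_eq_true, if_false, List.nil_append]
            exact ih tail2 (some "stdio") (by simp only [List.length_cons] at h; omega) (by decide)
          · rw [pvALoop_flag_other next tail2 [] hn]
            rw [ih (next :: tail2) none (by simp only [List.length_cons] at h ⊢; omega) (by decide)]
            rw [pvBFilter_cons]
            have hk3 : pvBKeep (some "--transport") next = pvBKeep none next := by
              simp [pvBKeep, hn]
            rw [hk3]
      · rw [pvALoop_keep token tail [] ht]
        have h1 : tail.length ≤ n := by simp only [List.length_cons] at h; omega
        rw [pvALoop_acc tail.length tail ([] ++ [token]) le_rfl,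
            ih tail (some token) h1 (by simpa using ht)]
        have hkeep : pvBKeep prev token = true := by
          simp [pvBKeep, ht]
          exact Or.inr hprev
        rw [hkeep]
        simp

-- ===== VERDICT (by name: the statement is the Claim_ definition above) =====
theorem normalize_legacy_stdio_args_py_spec : Claim_equal_normalize_legacy_stdio_args_py := by
  intro command args _
  unfold Spec_normalize_legacy_stdio_args_py
  unfold normalize_legacy_stdio_args_py normalize_legacy_stdio_args_py_alt
  by_cases hc : command = "npx"
  · simp only [hc, ne_eq, not_true_eq_false, if_false]
    exact pvKey args.length args none le_rfl (by decide)
  · simp [hc]
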